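-- pv_equiv track=rewrite | github.com/kidnamedtony/practice_codeprobs | codewars_probs.py | high
-- ===== SOURCE A (Python) =====
-- import string
-- import string
-- import string
-- import string
--
-- def high(x):
--     alpha_score = {v:k+1 for k,v in dict(enumerate(string.ascii_lowercase)).items()}
--     x_lst = x.split()
--     highest_scoring = (0, "")
--     for word in x_lst:
--         score = 0
--         for lttr in word:
--             score += alpha_score[lttr]
--             final_word_score = (score, word)
--         if final_word_score[0] > highest_scoring[0]:
--             highest_scoring = final_word_score
--     return highest_scoring[1]
-- ===== SOURCE B (Python) =====
-- import string
--
--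
-- def high(x):
--     scores = {c: i + 1 for i, c in enumerate(string.ascii_lowercase)}
--
--     def word_score(w):
--         return sum(scores[c] for c in w)
--
--     words = x.split()
--     if not words:
--         return ""
--     return sorted(words, key=word_score, reverse=True)[0]
-- ===== Notes on version B (the rewrite author's own statement) =====
-- stated objective: alternative
-- what changed: Replaces the running-max loop with nested manual scoring by a per-word score helper and a stable descending sort (sorted(words, key=word_score, reverse=True)[0]), returning "" for an empty word list.
import Mathlib
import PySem

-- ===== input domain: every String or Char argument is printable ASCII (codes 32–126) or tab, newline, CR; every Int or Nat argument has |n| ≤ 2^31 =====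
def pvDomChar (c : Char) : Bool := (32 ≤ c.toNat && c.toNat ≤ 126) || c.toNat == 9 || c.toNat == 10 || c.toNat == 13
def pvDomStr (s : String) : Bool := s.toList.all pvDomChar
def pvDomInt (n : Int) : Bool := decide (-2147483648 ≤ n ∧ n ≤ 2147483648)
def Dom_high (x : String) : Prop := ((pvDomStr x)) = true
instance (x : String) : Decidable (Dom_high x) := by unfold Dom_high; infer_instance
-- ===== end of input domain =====

-- B replaces A's running-max loop (nested manual scoring) by a per-word score key and a stable
-- descending sort, taking the first element; same values, no speed claim.

-- string.ascii_lowercase (module constant both Pythons read)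
def asciiLower : List Char := "abcdefghijklmnopqrstuvwxyz".toList

-- ===== PORT A =====
-- {v: k+1 for k, v in dict(enumerate(string.ascii_lowercase)).items()}
def alphaScoreA : PySem.Dict Char Int :=
  (PySem.Dict.ofList (PySem.List.enumerate asciiLower)).items.foldl
    (fun d kv => d.insert kv.2 (kv.1 + 1)) PySem.Dict.empty

def high (x : String) : String :=
  let xLst := PySem.Str.split₀ x
  let r := xLst.foldl (fun (st : (Int × String) × Option (Int × String)) word =>
      -- inner loop: score starts at 0; st.2 is the (possibly stale) variable final_word_score
      let inner := word.toList.foldl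
        (fun (p : Int × Option (Int × String)) lttr =>
          -- alpha_score[lttr]: the KeyError on a non-lowercase char is excluded by Pre_high
          -- (getD's default 0 is unreachable inside Pre_high)
          let score := p.1 + alphaScoreA.getD lttr 0
          (score, some (score, word)))
        (0, st.2)
      match inner.2 with
      | some fws => ((if fws.1 > st.1.1 then fws else st.1), some fws)
      | none => st)  -- final_word_score never assigned: Python would raise NameError; unreachable, split words are nonempty
    ((0, ""), none)
  r.1.2

-- ===== PORT B =====
-- {c: i + 1 for i, c in enumerate(string.ascii_lowercase)}
def alphaScoreB : PySem.Dict Char Int :=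
  (PySem.List.enumerate asciiLower).foldl (fun d ic => d.insert ic.2 (ic.1 + 1)) PySem.Dict.empty

-- sum(scores[c] for c in w); the KeyError on a non-lowercase char is excluded by Pre_high
def wordScoreB (w : String) : Int :=
  (w.toList.map (fun c => alphaScoreB.getD c 0)).sum

def high_alt (x : String) : String :=
  let words := PySem.Str.split₀ x
  match PySem.List.sorted words wordScoreB true with
  | [] => ""          -- words == []  (sorted is [] iff words is [])
  | w :: _ => w       -- sorted(words, key=word_score, reverse=True)[0]

-- ===== PRECONDITION & SPEC =====
-- Pre_ excludes exactly the inputs containing a non-whitespace character outside 'a'..'z',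
-- on which A raises KeyError (dict lookup of an unknown character).
def Pre_high (x : String) : Prop :=
  (x.toList.all (fun c => PySem.Chars.isspace c || (decide ('a' ≤ c) && decide (c ≤ 'z')))) = true
instance (x : String) : Decidable (Pre_high x) := by unfold Pre_high; infer_instance

def pvWitness_high : String := "hello to the world"

def Spec_high (x : String) (out : String) : Prop := out = high_alt x
instance (x : String) (out : String) : Decidable (Spec_high x out) := by unfold Spec_high; infer_instance

-- ===== CLAIM (what is proved, stated in full; the proofs are below) =====
def Claim_equal_high : Prop := ∀ (x : String), Dom_high x → Pre_high x → Spec_high x (high x)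

-- ===== LEMMAS AND PROOFS =====

-- the two dict comprehensions build the same dict
theorem alphaScore_eq : alphaScoreA = alphaScoreB := by decide

theorem charEq (c d : Char) (h : c.toNat = d.toNat) : c = d :=
  Char.ext (UInt32.toNat_inj.mp h)

theorem mem_of_toNat {c : Char} {n : Nat} (hn : c.toNat = n)
    (hv : (Char.ofNat n).toNat = n) (h : (Char.ofNat n) ∈ asciiLower) : c ∈ asciiLower :=
  (charEq c (Char.ofNat n) (hn.trans hv.symm)) ▸ h

theorem lower_mem (c : Char) (h1 : 'a' ≤ c) (h2 : c ≤ 'z') : c ∈ asciiLower := by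
  have ha : 97 ≤ c.toNat := h1
  have hb : c.toNat ≤ 122 := h2
  obtain ⟨n, hn⟩ : ∃ n, c.toNat = n := ⟨_, rfl⟩
  rw [hn] at ha hb
  interval_cases n <;> exact mem_of_toNat hn (by decide) (by decide)

theorem score_ge_one_all :
    asciiLower.all (fun d => decide (1 ≤ alphaScoreB.getD d 0)) = true := by decide

theorem score_ge_one (c : Char) (h1 : 'a' ≤ c) (h2 : c ≤ 'z') :
    1 ≤ alphaScoreB.getD c 0 :=
  of_decide_eq_true (List.all_eq_true.mp score_ge_one_all c (lower_mem c h1 h2))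

-- every word produced by split() is nonempty and made of non-whitespace characters of the input
theorem split₀_go_spec (s : List Char) : ∀ (cur : List Char) (acc : List (List Char)),
    (∀ c ∈ cur, PySem.Chars.isspace c = false) →
    ∀ w ∈ PySem.Chars.split₀.go s cur acc,
      w ∈ acc ∨ (w ≠ [] ∧ ∀ c ∈ w, PySem.Chars.isspace c = false ∧ (c ∈ cur ∨ c ∈ s)) := by
  induction s with
  | nil =>
    intro cur acc hcur w hw
    rw [PySem.Chars.split₀.go] at hw
    split at hw
    · exact Or.inl (List.mem_reverse.mp hw)
    · rename_i he
      rcases List.mem_cons.mp (List.mem_reverse.mp hw) with h | h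
      · subst h
        have hcne : cur ≠ [] := by simpa [List.isEmpty_iff] using he
        refine Or.inr ⟨by simpa [ne_eq, List.reverse_eq_nil_iff] using hcne, fun d hd => ?_⟩
        have hd' : d ∈ cur := List.mem_reverse.mp hd
        exact ⟨hcur d hd', Or.inl hd'⟩
      · exact Or.inl h
  | cons c rest ih =>
    intro cur acc hcur w hw
    rw [PySem.Chars.split₀.go] at hw
    by_cases hs : PySem.Chars.isspace c = true
    · rw [if_pos hs] at hw
      by_cases he : cur.isEmpty = true
      · rw [if_pos he] at hw
        rcases ih [] acc (by simp) w hw with h | ⟨hne, hp⟩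
        · exact Or.inl h
        · exact Or.inr ⟨hne, fun d hd => ⟨(hp d hd).1, Or.inr (by
            rcases (hp d hd).2 with h | h
            · simp at h
            · exact List.mem_cons_of_mem c h)⟩⟩
      · rw [if_neg he] at hw
        rcases ih [] (cur.reverse :: acc) (by simp) w hw with h | ⟨hne, hp⟩
        · rcases List.mem_cons.mp h with h | h
          · subst h
            have hcne : cur ≠ [] := by simpa [List.isEmpty_iff] using he
            refine Or.inr ⟨by simpa [ne_eq, List.reverse_eq_nil_iff] using hcne, fun d hd => ?_⟩
            have hd' : d ∈ cur := List.mem_reverse.mp hd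
            exact ⟨hcur d hd', Or.inl hd'⟩
          · exact Or.inl h
        · exact Or.inr ⟨hne, fun d hd => ⟨(hp d hd).1, Or.inr (by
            rcases (hp d hd).2 with h | h
            · simp at h
            · exact List.mem_cons_of_mem c h)⟩⟩
    · rw [if_neg hs] at hw
      have hs' : PySem.Chars.isspace c = false := by simpa using hs
      rcases ih (c :: cur) acc (by
          intro d hd
          rcases List.mem_cons.mp hd with h | h
          · subst h; exact hs'
          · exact hcur d h) w hw with h | ⟨hne, hp⟩
      · exact Or.inl h
      · refine Or.inr ⟨hne, fun d hd => ⟨(hp d hd).1, ?_⟩⟩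
        rcases (hp d hd).2 with h | h
        · rcases List.mem_cons.mp h with h | h
          · exact Or.inr (h ▸ List.mem_cons_self)
          · exact Or.inl h
        · exact Or.inr (List.mem_cons_of_mem c h)

theorem split₀_spec (s : List Char) :
    ∀ w ∈ PySem.Chars.split₀ s, w ≠ [] ∧ ∀ c ∈ w, PySem.Chars.isspace c = false ∧ c ∈ s := by
  intro w hw
  rcases split₀_go_spec s [] [] (by simp) w hw with h | ⟨hne, hp⟩
  · simp at h
  · exact ⟨hne, fun c hc => ⟨(hp c hc).1, by
      rcases (hp c hc).2 with h | h
      · simp at h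
      · exact h⟩⟩

-- A's inner character loop written out: final score and final_word_score after a nonempty word
theorem inner_fold_spec (word : String) :
    ∀ (cs : List Char) (s0 : Int) (fw : Option (Int × String)), cs ≠ [] →
      cs.foldl (fun (p : Int × Option (Int × String)) lttr =>
          let score := p.1 + alphaScoreA.getD lttr 0
          (score, some (score, word))) (s0, fw)
        = (s0 + (cs.map (fun c => alphaScoreA.getD c 0)).sum,
           some (s0 + (cs.map (fun c => alphaScoreA.getD c 0)).sum, word)) := by
  intro cs
  induction cs with
  | nil => intro _ _ h; exact absurd rfl h
  | cons c rest ih =>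
    intro s0 fw _
    simp only [List.foldl_cons]
    rcases Decidable.em (rest = []) with h | h
    · subst h; simp
    · rw [ih (s0 + alphaScoreA.getD c 0) _ h]
      simp only [List.map_cons, List.sum_cons]
      rw [add_assoc]

theorem sum_ge_one (g : Char → Int) (l : List Char) (hne : l ≠ [])
    (h : ∀ c ∈ l, 1 ≤ g c) : 1 ≤ (l.map g).sum := by
  rcases l with _ | ⟨c, rest⟩
  · exact absurd rfl hne
  · have h1 : 1 ≤ g c := h c List.mem_cons_self
    have h2 : 0 ≤ (rest.map g).sum := by
      apply List.sum_nonneg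
      intro x hx
      rcases List.mem_map.mp hx with ⟨d, hd, rfl⟩
      linarith [h d (List.mem_cons_of_mem c hd)]
    simp only [List.map_cons, List.sum_cons]
    linarith

-- A's word loop, first component, equals the bare running-max fold on the word scores
theorem outer_fold_spec (ws : List String) (hne : ∀ w ∈ ws, w.toList ≠ []) :
    ∀ (hs : Int × String) (fw : Option (Int × String)),
    (ws.foldl (fun (st : (Int × String) × Option (Int × String)) word =>
      let inner := word.toList.foldl
        (fun (p : Int × Option (Int × String)) lttr =>
          let score := p.1 + alphaScoreA.getD lttr 0
          (score, some (score, word)))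
        (0, st.2)
      match inner.2 with
      | some fws => ((if fws.1 > st.1.1 then fws else st.1), some fws)
      | none => st) (hs, fw)).1
    = ws.foldl (fun h w => if wordScoreB w > h.1 then (wordScoreB w, w) else h) hs := by
  induction ws with
  | nil => intro hs fw; rfl
  | cons w rest ih =>
    intro hs fw
    have hwne : w.toList ≠ [] := hne w List.mem_cons_self
    have hrest : ∀ v ∈ rest, v.toList ≠ [] := fun v hv => hne v (List.mem_cons_of_mem w hv)
    simp only [List.foldl_cons]
    rw [inner_fold_spec w w.toList 0 fw hwne]
    have hscore : (0 : Int) + (w.toList.map (fun c => alphaScoreA.getD c 0)).sum = wordScoreB w := by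
      rw [zero_add, wordScoreB, alphaScore_eq]
    simp only [hscore]
    exact ih hrest _ _

theorem sorted_append_singleton (f : String → Int) (ws : List String) (w : String) :
    PySem.List.sorted (ws ++ [w]) f true
      = PySem.List.insertBy (fun a b => decide (f b < f a)) w (PySem.List.sorted ws f true) := by
  rw [PySem.List.sorted_rev_eq_foldl_insertBy, List.foldl_append, List.foldl_cons, List.foldl_nil,
    ← PySem.List.sorted_rev_eq_foldl_insertBy]

-- invariant: with all keys positive, the stable descending sort starts with the running max,
-- and the running max's stored score is the key of its stored word
theorem sorted_inv (f : String → Int) (ws : List String) (hpos : ∀ w ∈ ws, 0 < f w) :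
    (ws.foldl (fun h w => if f w > h.1 then (f w, w) else h) ((0 : Int), "") = ((0 : Int), "")
        ∧ PySem.List.sorted ws f true = [])
    ∨ (∃ t, PySem.List.sorted ws f true
          = (ws.foldl (fun h w => if f w > h.1 then (f w, w) else h) ((0 : Int), "")).2 :: t
        ∧ (ws.foldl (fun h w => if f w > h.1 then (f w, w) else h) ((0 : Int), "")).1
          = f (ws.foldl (fun h w => if f w > h.1 then (f w, w) else h) ((0 : Int), "")).2) := by
  induction ws using List.reverseRecOn with
  | nil => left; exact ⟨rfl, rfl⟩
  | append_singleton ws w ih =>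
    right
    have hw : 0 < f w := hpos w (by simp)
    have hpos' : ∀ v ∈ ws, 0 < f v := fun v hv => hpos v (by simp [hv])
    rw [List.foldl_append, List.foldl_cons, List.foldl_nil, sorted_append_singleton]
    rcases ih hpos' with ⟨hS, hL⟩ | ⟨t, hL, hK⟩
    · rw [hS, hL]
      simp only [PySem.List.insertBy]
      rw [if_pos (by simpa using hw)]
      exact ⟨[], rfl, rfl⟩
    · rw [hL]
      simp only [PySem.List.insertBy]
      by_cases hlt : f (ws.foldl (fun h w => if f w > h.1 then (f w, w) else h) ((0 : Int), "")).2 < f w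
      · rw [if_pos (by simpa using hlt), if_pos (by rw [hK]; exact hlt)]
        exact ⟨_ :: t, rfl, rfl⟩
      · rw [if_neg (by simpa using hlt), if_neg (by rw [hK]; exact hlt)]
        exact ⟨_, rfl, hK⟩

theorem sorted_head_eq_foldl_max (f : String → Int) (ws : List String)
    (hpos : ∀ w ∈ ws, 0 < f w) :
    (ws.foldl (fun h w => if f w > h.1 then (f w, w) else h) ((0 : Int), "")).2
      = (match PySem.List.sorted ws f true with
         | [] => ""
         | w :: _ => w) := by
  rcases sorted_inv f ws hpos with ⟨hS, hL⟩ | ⟨t, hL, _⟩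
  · rw [hS, hL]
  · rw [hL]

-- ===== VERDICT (by name: the statement is the Claim_ definition above) =====
theorem high_spec : Claim_equal_high := by
  intro x _ hpre
  have hpre' := List.all_eq_true.mp hpre
  have hword : ∀ w ∈ PySem.Str.split₀ x,
      w.toList ≠ [] ∧ ∀ c ∈ w.toList, 'a' ≤ c ∧ c ≤ 'z' := by
    intro w hw
    have hmem : w.toList ∈ PySem.Chars.split₀ x.toList := by
      rw [← PySem.Str.split₀_map_toList]
      exact List.mem_map_of_mem hw
    obtain ⟨hne, hp⟩ := split₀_spec x.toList w.toList hmem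
    refine ⟨hne, fun c hc => ?_⟩
    obtain ⟨hnsp, hcx⟩ := hp c hc
    have := hpre' c hcx
    simp only [hnsp, Bool.false_or, Bool.and_eq_true, decide_eq_true_eq] at this
    exact this
  have hne : ∀ w ∈ PySem.Str.split₀ x, w.toList ≠ [] := fun w hw => (hword w hw).1
  have hpos : ∀ w ∈ PySem.Str.split₀ x, 0 < wordScoreB w := by
    intro w hw
    have h1 : 1 ≤ wordScoreB w := by
      apply sum_ge_one _ _ (hword w hw).1
      intro c hc
      exact score_ge_one c ((hword w hw).2 c hc).1 ((hword w hw).2 c hc).2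
    omega
  show high x = high_alt x
  simp only [high, high_alt]
  rw [outer_fold_spec (PySem.Str.split₀ x) hne ((0 : Int), "") none]
  exact sorted_head_eq_foldl_max wordScoreB (PySem.Str.split₀ x) hpos
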